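-- pv_equiv track=rewrite | github.com/kmlawson/shoebox | explore/old/extract_letters.py | parse_row_values
-- ===== SOURCE A (Python) =====
-- def parse_row_values(row_str):
--     """Parse a single row's values"""
--     values = []
--     current = []
--     in_quotes = False
--     escape_next = False
--
--     for char in row_str:
--         if escape_next:
--             current.append(char)
--             escape_next = False
--             continue
--
--         if char == '\\':
--             escape_next = True
--             current.append(char)
--             continue
--
--         if char == "'" and not escape_next:
--             in_quotes = not in_quotes
--             continue
--
--         if char == ',' and not in_quotes:
--             val = ''.join(current).strip()
--             if val == 'NULL':
--                 values.append(None)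
--             else:
--                 # Unescape SQL escapes
--                 val = val.replace("\\'", "'").replace("\\\\", "\\").replace("\\n", "\n")
--                 values.append(val)
--             current = []
--             continue
--
--         current.append(char)
--
--     # Add last value
--     if current:
--         val = ''.join(current).strip()
--         if val == 'NULL':
--             values.append(None)
--         else:
--             val = val.replace("\\'", "'").replace("\\\\", "\\").replace("\\n", "\n")
--             values.append(val)
--
--     return values
-- ===== SOURCE B (Python) =====
-- def _transform(seg):
--     val = seg.strip()
--     if val == 'NULL':
--         return None
--     return val.replace("\\'", "'").replace("\\\\", "\\").replace("\\n", "\n")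
--
--
-- def parse_row_values(row_str):
--     # Split-based parser, no per-character state machine:
--     # Stage 1: split on '\' to neutralize escapes -> (text, protected) pieces.
--     # Stage 2: split unprotected text on "'" (toggling quote parity per piece)
--     #          and split unquoted runs on ',' to cut the raw fields.
--     # Stage 3: map the shared strip/NULL/unescape transform over the raw fields.
--     parts = row_str.split('\\')
--     pieces = [(parts[0], False)]
--     i = 1
--     while i < len(parts):
--         part = parts[i]
--         if part:
--             pieces.append(('\\' + part[0], True))
--             pieces.append((part[1:], False))
--             i += 1
--         elif i + 1 < len(parts):
--             # escaped backslash: the escaped char is the next separator itself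
--             pieces.append(('\\\\', True))
--             pieces.append((parts[i + 1], False))
--             i += 2
--         else:
--             pieces.append(('\\', True))
--             i += 1
--
--     segments = []
--     buf = ''
--     in_quotes = False
--     for text, protected in pieces:
--         if protected:
--             buf += text
--             continue
--         qparts = text.split("'")
--         for j, qp in enumerate(qparts):
--             if j:
--                 in_quotes = not in_quotes
--             if in_quotes:
--                 buf += qp
--             else:
--                 fields = qp.split(',')
--                 buf += fields[0]
--                 for f in fields[1:]:
--                     segments.append(buf)
--                     buf = f
--     if buf:
--         segments.append(buf)
--     return [_transform(s) for s in segments]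
-- ===== Notes on version B (the rewrite author's own statement) =====
-- stated objective: faster
-- what changed: B has no per-character state machine at all: it splits the row on the backslash character to neutralize escapes into protected/unprotected pieces, splits unprotected pieces on single quotes to track quote parity, splits unquoted runs on the comma character to cut the raw fields, then maps one shared strip/NULL/unescape transform over them; A is a single-pass character loop with escape_next/in_quotes flags and the finalization block inlined twice.
import Mathlib
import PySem

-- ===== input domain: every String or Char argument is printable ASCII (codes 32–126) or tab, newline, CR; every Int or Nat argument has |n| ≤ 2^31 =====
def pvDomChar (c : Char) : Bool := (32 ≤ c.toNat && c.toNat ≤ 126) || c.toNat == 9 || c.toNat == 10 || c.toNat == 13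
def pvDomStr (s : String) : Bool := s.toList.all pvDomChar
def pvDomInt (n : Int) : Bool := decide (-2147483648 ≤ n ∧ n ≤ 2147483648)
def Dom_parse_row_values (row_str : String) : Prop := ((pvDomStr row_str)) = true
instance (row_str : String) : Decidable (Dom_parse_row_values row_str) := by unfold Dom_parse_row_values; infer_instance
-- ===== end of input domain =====

-- B replaces A's per-character escape/quote state machine by a split-based parser
-- (split on backslash, then on quotes, then on commas, then one shared transform);
-- objective: faster (a timing run measured B faster at the largest size).

-- ===== PORT A =====
-- A's per-value finalization block (A writes it twice verbatim)
def pvFinalizeA (current : List Char) : Option String :=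
  let val := PySem.Str.strip (String.ofList current)
  if val = "NULL" then none
  else some (PySem.Str.replace (PySem.Str.replace (PySem.Str.replace val "\\'" "'") "\\\\" "\\") "\\n" "\n")

-- the for-loop, state = (values, current, in_quotes, escape_next)
def pvALoop : List Char → List (Option String) × List Char × Bool × Bool →
    List (Option String) × List Char × Bool × Bool
  | [], st => st
  | c :: rest, (values, current, in_quotes, escape_next) =>
    if escape_next then pvALoop rest (values, current ++ [c], in_quotes, false)
    else if c = '\\' then pvALoop rest (values, current ++ [c], in_quotes, true)
    else if c = '\'' ∧ escape_next = false then pvALoop rest (values, current, !in_quotes, escape_next)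
    else if c = ',' ∧ in_quotes = false then
      pvALoop rest (values ++ [pvFinalizeA current], [], in_quotes, escape_next)
    else pvALoop rest (values, current ++ [c], in_quotes, escape_next)

-- the trailing "if current:" block after the loop
def pvAFinish : List (Option String) × List Char × Bool × Bool → List (Option String)
  | (values, current, _, _) => if current ≠ [] then values ++ [pvFinalizeA current] else values

def parse_row_values (row_str : String) : List (Option String) :=
  pvAFinish (pvALoop row_str.toList ([], [], false, false))

-- ===== PORT B =====
-- Source B's _transform
def pvTransform (seg : List Char) : Option String :=
  let val := PySem.Str.strip (String.ofList seg)
  if val = "NULL" then none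
  else some (PySem.Str.replace (PySem.Str.replace (PySem.Str.replace val "\\'" "'") "\\\\" "\\") "\\n" "\n")

-- stage 1 while-loop over parts[1:], building (text, protected) pieces
def pvPieces : List (List Char) → List (List Char × Bool)
  | [] => []
  | (c :: cs) :: rest => (['\\', c], true) :: (cs, false) :: pvPieces rest
  | [] :: p2 :: rest => (['\\', '\\'], true) :: (p2, false) :: pvPieces rest
  | [[]] => [(['\\'], true)]

-- inner "for f in fields[1:]" step
def pvCommaStep (st : List (List Char) × List Char) (f : List Char) :
    List (List Char) × List Char := (st.1 ++ [st.2], f)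

-- "fields = qp.split(','); buf += fields[0]; for f in fields[1:]: …"
def pvHandleRun (segs : List (List Char)) (buf qp : List Char) :
    List (List Char) × List Char :=
  match PySem.Chars.splitOn qp [','] with
  | [] => (segs, buf)
  | f0 :: fs => fs.foldl pvCommaStep (segs, buf ++ f0)

-- one quote-delimited piece, under parity inq
def pvHandleQP (inq : Bool) (st : List (List Char) × List Char) (qp : List Char) :
    List (List Char) × List Char :=
  if inq then (st.1, st.2 ++ qp) else pvHandleRun st.1 st.2 qp

-- "qparts = text.split(\"'\")": first piece with current parity, the rest toggling
def pvProcessText (st : (List (List Char) × List Char) × Bool) (text : List Char) :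
    (List (List Char) × List Char) × Bool :=
  match PySem.Chars.splitOn text ['\''] with
  | [] => st
  | q0 :: qs =>
    qs.foldl (fun st qp => ((pvHandleQP (!st.2) st.1 qp), !st.2))
      (pvHandleQP st.2 st.1 q0, st.2)

-- stage 2 loop body over the pieces
def pvPieceStep (st : (List (List Char) × List Char) × Bool) (p : List Char × Bool) :
    (List (List Char) × List Char) × Bool :=
  if p.2 then ((st.1.1, st.1.2 ++ p.1), st.2) else pvProcessText st p.1

def parse_row_values_alt (row_str : String) : List (Option String) :=
  match PySem.Chars.splitOn row_str.toList ['\\'] with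
  | [] => []
  | p0 :: ps =>
    let st := (((p0, false) :: pvPieces ps).foldl pvPieceStep (([], []), false)).1
    let segments := if st.2 ≠ [] then st.1 ++ [st.2] else st.1
    segments.map pvTransform

-- ===== PRECONDITION & SPEC =====
def Spec_parse_row_values (row_str : String) (out : List (Option String)) : Prop := out = parse_row_values_alt row_str
instance (row_str : String) (out : List (Option String)) : Decidable (Spec_parse_row_values row_str out) := by unfold Spec_parse_row_values; infer_instance

-- ===== CLAIM =====
def Claim_equal_parse_row_values : Prop := ∀ (row_str : String), Dom_parse_row_values row_str → Spec_parse_row_values row_str (parse_row_values row_str)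

-- ===== LEMMAS AND PROOFS =====

-- structural single-character splitOn, the normal form both sides are reduced to
def pvSplit1 (c0 : Char) : List Char → List (List Char)
  | [] => [[]]
  | c :: rest => if c = c0 then [] :: pvSplit1 c0 rest else (pvSplit1 c0 rest).modifyHead (c :: ·)

lemma pvSplit1_ne_nil (c0 : Char) (l : List Char) : pvSplit1 c0 l ≠ [] := by
  cases l with
  | nil => simp [pvSplit1]
  | cons c rest =>
      simp only [pvSplit1]
      split_ifs
      · simp
      · exact fun h => by
          have := List.modifyHead_eq_nil_iff (f := (c :: ·)) (l := pvSplit1 c0 rest)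
          rw [h] at this; exact pvSplit1_ne_nil c0 rest (this.mp rfl)

lemma pvGo_single (c0 : Char) : ∀ (l : List Char) (fuel : Nat), l.length < fuel →
    ∀ (cur : List Char) (acc : List (List Char)),
    PySem.Chars.splitOn.go [c0] fuel l cur acc
      = acc.reverse ++ (pvSplit1 c0 l).modifyHead (cur.reverse ++ ·) := by
  intro l
  induction l with
  | nil =>
      intro fuel hf cur acc
      cases fuel with
      | zero => omega
      | succ f => simp [PySem.Chars.splitOn.go, pvSplit1]
  | cons c rest ih =>
      intro fuel hf cur acc
      cases fuel with
      | zero => omega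
      | succ f =>
        have hr : rest.length < f := by simpa using hf
        by_cases hc : c = c0
        · subst hc
          have hp : List.isPrefixOf [c] (c :: rest) = true := by simp [List.isPrefixOf]
          simp only [PySem.Chars.splitOn.go, hp, if_pos]
          have hd : List.drop [c].length (c :: rest) = rest := by simp
          rw [hd, ih f hr [] (cur.reverse :: acc)]
          simp only [pvSplit1, if_pos rfl]
          cases h : pvSplit1 c rest with
          | nil => exact absurd h (pvSplit1_ne_nil c rest)
          | cons a as => simp
        · have hp : List.isPrefixOf [c0] (c :: rest) = false := by
            simp [List.isPrefixOf]; exact fun h => absurd h.symm hc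
          simp only [PySem.Chars.splitOn.go, hp, Bool.false_eq_true, if_false]
          rw [ih f hr (c :: cur) acc]
          rw [show pvSplit1 c0 (c :: rest) = (pvSplit1 c0 rest).modifyHead (c :: ·) from by
            simp [pvSplit1, hc]]
          cases h : pvSplit1 c0 rest with
          | nil => exact absurd h (pvSplit1_ne_nil c0 rest)
          | cons a as => simp

lemma pvSplitOn_single (l : List Char) (c0 : Char) :
    PySem.Chars.splitOn l [c0] = pvSplit1 c0 l := by
  have := pvGo_single c0 l (l.length + 1) (by omega) [] []
  simp only [PySem.Chars.splitOn] at *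
  rw [this]
  cases h : pvSplit1 c0 l with
  | nil => exact absurd h (pvSplit1_ne_nil c0 l)
  | cons a as => simp

-- single-character steps of the machines, as fold bodies
def pvCStep (st : List (List Char) × List Char) (c : Char) : List (List Char) × List Char :=
  if c = ',' then (st.1 ++ [st.2], []) else (st.1, st.2 ++ [c])

def pvQStep (st : (List (List Char) × List Char) × Bool) (c : Char) :
    (List (List Char) × List Char) × Bool :=
  if c = '\'' then (st.1, !st.2)
  else if c = ',' ∧ st.2 = false then ((st.1.1 ++ [st.1.2], []), st.2)
  else ((st.1.1, st.1.2 ++ [c]), st.2)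

-- the escape-consuming machine: the normal form of both ports
def pvEsc : List Char → (List (List Char) × List Char) × Bool → (List (List Char) × List Char) × Bool
  | [], st => st
  | c :: rest, st =>
    if c = '\\' then
      match rest with
      | [] => ((st.1.1, st.1.2 ++ ['\\']), st.2)
      | n :: r' => pvEsc r' ((st.1.1, st.1.2 ++ ['\\', n]), st.2)
    else pvEsc rest (pvQStep st c)

def pvFinishSegs (st : (List (List Char) × List Char) × Bool) : List (List Char) :=
  if st.1.2 ≠ [] then st.1.1 ++ [st.1.2] else st.1.1

-- the comma fold over a split equals the char fold
lemma pvHandleRun_eq (qp : List Char) : ∀ (segs : List (List Char)) (buf : List Char),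
    pvHandleRun segs buf qp = qp.foldl pvCStep (segs, buf) := by
  induction qp with
  | nil => intro segs buf; simp [pvHandleRun, pvSplitOn_single, pvSplit1]
  | cons c rest ih =>
      intro segs buf
      simp only [pvHandleRun, pvSplitOn_single] at ih ⊢
      by_cases hc : c = ','
      · subst hc
        rw [show pvSplit1 ',' (',' :: rest) = [] :: pvSplit1 ',' rest from by simp [pvSplit1]]
        rw [show List.foldl pvCStep (segs, buf) (',' :: rest)
              = List.foldl pvCStep (segs ++ [buf], []) rest from by simp [pvCStep]]
        rw [← ih (segs ++ [buf]) []]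
        cases h : pvSplit1 ',' rest with
        | nil => exact absurd h (pvSplit1_ne_nil ',' rest)
        | cons f0 fs => simp [pvCommaStep]
      · rw [show pvSplit1 ',' (c :: rest) = (pvSplit1 ',' rest).modifyHead (c :: ·) from by
          simp [pvSplit1, hc]]
        rw [show List.foldl pvCStep (segs, buf) (c :: rest)
              = List.foldl pvCStep (segs, buf ++ [c]) rest from by simp [pvCStep, hc]]
        rw [← ih segs (buf ++ [c])]
        cases h : pvSplit1 ',' rest with
        | nil => exact absurd h (pvSplit1_ne_nil ',' rest)
        | cons f0 fs => simp [List.append_assoc]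

lemma pvHandleQP_nil (inq : Bool) (st : List (List Char) × List Char) :
    pvHandleQP inq st [] = st := by
  cases st; cases inq <;> simp [pvHandleQP, pvHandleRun_eq]

lemma pvHandleQP_cons (inq : Bool) (st : List (List Char) × List Char) (c : Char)
    (qp : List Char) (hc : c ≠ '\'') :
    pvHandleQP inq st (c :: qp) = pvHandleQP inq (pvQStep (st, inq) c).1 qp := by
  obtain ⟨segs, buf⟩ := st
  cases inq with
  | true =>
      have h1 : (pvQStep ((segs, buf), true) c).1 = (segs, buf ++ [c]) := by
        simp [pvQStep, hc]
      rw [h1]; simp [pvHandleQP, List.append_assoc]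
  | false =>
      have h1 : (pvQStep ((segs, buf), false) c).1 = pvCStep (segs, buf) c := by
        by_cases h2 : c = ',' <;> simp [pvQStep, pvCStep, hc, h2]
      rw [h1]
      simp [pvHandleQP, pvHandleRun_eq]

lemma pvQStep_snd (st : (List (List Char) × List Char) × Bool) (c : Char) (hc : c ≠ '\'') :
    (pvQStep st c).2 = st.2 := by
  by_cases h2 : c = ',' ∧ st.2 = false <;> simp [pvQStep, hc, h2]

-- the quote fold over a split equals the char fold
lemma pvProcessText_eq (text : List Char) :
    ∀ (st : (List (List Char) × List Char) × Bool),
    pvProcessText st text = text.foldl pvQStep st := by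
  induction text with
  | nil =>
      intro st
      simp [pvProcessText, pvSplitOn_single, pvSplit1, pvHandleQP_nil]
  | cons c rest ih =>
      intro st
      obtain ⟨⟨segs, buf⟩, inq⟩ := st
      simp only [pvProcessText, pvSplitOn_single] at ih ⊢
      by_cases hc : c = '\''
      · subst hc
        rw [show pvSplit1 '\'' ('\'' :: rest) = [] :: pvSplit1 '\'' rest from by
          simp [pvSplit1]]
        rw [show List.foldl pvQStep ((segs, buf), inq) ('\'' :: rest)
              = List.foldl pvQStep ((segs, buf), !inq) rest from by simp [pvQStep]]
        have := ih ((segs, buf), !inq)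
        rw [← this]
        cases h : pvSplit1 '\'' rest with
        | nil => exact absurd h (pvSplit1_ne_nil _ rest)
        | cons q0 qs => simp [pvHandleQP_nil]
      · rw [show pvSplit1 '\'' (c :: rest) = (pvSplit1 '\'' rest).modifyHead (c :: ·) from by
          simp [pvSplit1, hc]]
        rw [show List.foldl pvQStep ((segs, buf), inq) (c :: rest)
              = List.foldl pvQStep (pvQStep ((segs, buf), inq) c) rest from by simp]
        rw [← ih (pvQStep ((segs, buf), inq) c)]
        have hq : pvQStep ((segs, buf), inq) c = ((pvQStep ((segs, buf), inq) c).1, inq) := by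
          have := pvQStep_snd ((segs, buf), inq) c hc
          exact Prod.ext rfl this
        cases h : pvSplit1 '\'' rest with
        | nil => exact absurd h (pvSplit1_ne_nil _ rest)
        | cons q0 qs =>
          rw [hq]
          simp only [List.modifyHead]
          rw [pvHandleQP_cons inq (segs, buf) c q0 hc]

-- the outer fold over pieces equals the escape machine
lemma pvPieces_eq : ∀ (l : List Char) (st : (List (List Char) × List Char) × Bool),
    (match pvSplit1 '\\' l with
      | [] => st
      | p0 :: ps => ((p0, false) :: pvPieces ps).foldl pvPieceStep st)
      = pvEsc l st := by
  intro l st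
  fun_induction pvEsc l st with
  | case1 st => simp [pvSplit1, pvPieces, pvPieceStep, pvProcessText_eq]
  | case2 st =>
      rw [show pvSplit1 '\\' ('\\' :: []) = [] :: [[]] from by simp [pvSplit1]]
      simp [pvPieces, pvPieceStep, pvProcessText_eq, pvEsc, pvHandleQP_nil]
  | case3 st n r' ih =>
      rw [show pvSplit1 '\\' ('\\' :: n :: r') = [] :: pvSplit1 '\\' (n :: r') from by
        simp [pvSplit1]]
      by_cases hn : n = '\\'
      · subst hn
        rw [show pvSplit1 '\\' ('\\' :: r') = [] :: pvSplit1 '\\' r' from by simp [pvSplit1]]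
        cases h : pvSplit1 '\\' r' with
        | nil => exact absurd h (pvSplit1_ne_nil _ r')
        | cons q0 qs =>
          rw [h] at ih
          simp only [pvPieces, List.foldl_cons] at ih ⊢
          rw [← ih]
          simp [pvPieceStep, pvProcessText_eq, pvHandleQP_nil]
      · rw [show pvSplit1 '\\' (n :: r') = (pvSplit1 '\\' r').modifyHead (n :: ·) from by
          simp [pvSplit1, hn]]
        cases h : pvSplit1 '\\' r' with
        | nil => exact absurd h (pvSplit1_ne_nil _ r')
        | cons q0 qs =>
          rw [h] at ih
          simp only [List.modifyHead, pvPieces, List.foldl_cons] at ih ⊢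
          rw [← ih]
          congr 1
          obtain ⟨⟨segs, buf⟩, inq⟩ := st
          simp [pvPieceStep, pvProcessText_eq]
  | case4 c rest st hc ih =>
      rw [show pvSplit1 '\\' (c :: rest) = (pvSplit1 '\\' rest).modifyHead (c :: ·) from by
        simp [pvSplit1, hc]]
      cases h : pvSplit1 '\\' rest with
      | nil => exact absurd h (pvSplit1_ne_nil _ rest)
      | cons q0 qs =>
        rw [h] at ih
        simp only [List.modifyHead, List.foldl_cons] at ih ⊢
        rw [← ih]
        congr 1
        simp [pvPieceStep, pvProcessText_eq]

lemma pvFinalizeA_eq : pvFinalizeA = pvTransform := rfl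

-- A's loop equals the escape machine plus finalization
lemma pvA_main : ∀ (cs : List Char) (st : (List (List Char) × List Char) × Bool),
    pvAFinish (pvALoop cs (st.1.1.map pvTransform, st.1.2, st.2, false))
      = (pvFinishSegs (pvEsc cs st)).map pvTransform := by
  intro cs st
  fun_induction pvEsc cs st with
  | case1 st =>
      by_cases h : st.1.2 = [] <;>
        simp [pvALoop, pvAFinish, pvFinishSegs, h, pvFinalizeA_eq]
  | case2 st =>
      simp [pvALoop, pvAFinish, pvFinishSegs, pvFinalizeA_eq]
  | case3 st n r' ih =>
      simp only [pvALoop, if_false, Bool.false_eq_true, if_pos rfl, if_true]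
      simpa [List.append_assoc] using ih
  | case4 c rest st hc ih =>
      by_cases h1 : c = '\''
      · subst h1
        have hq : pvQStep st '\'' = (st.1, !st.2) := by simp [pvQStep]
        rw [hq] at ih
        simpa [pvALoop, hc] using ih
      · by_cases h2 : c = ',' ∧ st.2 = false
        · obtain ⟨h2c, h2q⟩ := h2
          subst h2c
          have hq : pvQStep st ',' = ((st.1.1 ++ [st.1.2], []), st.2) := by
            simp [pvQStep, h2q]
          rw [hq] at ih ⊢
          simp only [List.map_append, List.map_cons, List.map_nil] at ih
          simpa [pvALoop, hc, h1, h2q, pvFinalizeA_eq] using ih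
        · have hq : pvQStep st c = ((st.1.1, st.1.2 ++ [c]), st.2) := by
            simp [pvQStep, h1, h2]
          rw [hq] at ih ⊢
          simpa [pvALoop, hc, h1, h2] using ih

-- ===== VERDICT =====
theorem parse_row_values_spec : Claim_equal_parse_row_values := by
  intro row_str _
  unfold Spec_parse_row_values parse_row_values parse_row_values_alt
  rw [pvSplitOn_single]
  have hmain := pvPieces_eq row_str.toList (([], []), false)
  have hA := pvA_main row_str.toList (([], []), false)
  simp only [List.map_nil] at hA
  cases h : pvSplit1 '\\' row_str.toList with
  | nil => exact absurd h (pvSplit1_ne_nil _ _)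
  | cons p0 ps =>
    rw [h] at hmain
    rw [hA, ← hmain]
    simp [pvFinishSegs]
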